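-- pv_equiv track=rewrite | github.com/CL-Sarthak/Azure-Directory-API-POC | app/main.py | _pick_primary_smtp
-- ===== SOURCE A (Python) =====
-- from typing import Any, Dict, Optional, List, Tuple
--
-- def _pick_primary_smtp(proxy_addrs: Optional[List[str]]) -> Optional[str]:
--     if not proxy_addrs:
--         return None
--     primary = next((a for a in proxy_addrs if isinstance(a, str) and a.startswith("SMTP:")), None)
--     if primary:
--         return primary.split(":", 1)[1]
--     any_smtp = next((a for a in proxy_addrs if isinstance(a, str) and a.lower().startswith("smtp:")), None)
--     if any_smtp:
--         return any_smtp.split(":", 1)[1]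
--     return None
-- ===== SOURCE B (Python) =====
-- from typing import Optional, List
--
-- def _pick_primary_smtp(proxy_addrs: Optional[List[str]]) -> Optional[str]:
--     if not proxy_addrs:
--         return None
--     any_smtp = None
--     for a in proxy_addrs:
--         if isinstance(a, str):
--             if a.startswith("SMTP:"):
--                 return a.split(":", 1)[1]
--             if any_smtp is None and a.lower().startswith("smtp:"):
--                 any_smtp = a
--     return any_smtp.split(":", 1)[1] if any_smtp is not None else None
-- ===== Notes on version B (the rewrite author's own statement) =====
-- stated objective: simpler
-- what changed: Replaces A's two sequential generator scans (first for an exact 'SMTP:' prefix, then for a case-insensitive one) by a single traversal that returns at the first exact match and maintains one fallback candidate.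
import Mathlib
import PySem

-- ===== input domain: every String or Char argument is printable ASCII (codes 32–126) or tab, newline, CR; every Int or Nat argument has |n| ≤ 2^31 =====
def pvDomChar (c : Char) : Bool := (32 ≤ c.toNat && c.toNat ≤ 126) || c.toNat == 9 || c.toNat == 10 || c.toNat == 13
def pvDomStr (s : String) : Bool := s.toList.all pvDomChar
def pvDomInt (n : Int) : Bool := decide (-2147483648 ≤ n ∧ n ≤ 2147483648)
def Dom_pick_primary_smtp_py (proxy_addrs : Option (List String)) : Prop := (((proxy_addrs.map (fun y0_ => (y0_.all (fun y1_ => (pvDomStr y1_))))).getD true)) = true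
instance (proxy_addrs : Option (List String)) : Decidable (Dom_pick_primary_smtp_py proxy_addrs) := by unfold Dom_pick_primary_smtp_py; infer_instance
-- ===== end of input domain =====

-- B replaces A's two sequential scans by one traversal with a single fallback candidate (simpler, same cost).


-- ===== PORT A =====
-- shared primitive: Python's a.split(":", 1)[1] (none exactly where Python would raise IndexError)
def pvSplitTail (a : String) : Option String :=
  match PySem.Str.splitMax? a ":" 1 with
  | some ps => PySem.List.pyGet? ps 1
  | none => none

-- A's second scan: any_smtp = next((a for a in … if a.lower().startswith("smtp:")), None); if any_smtp: …
def pvAnySmtp (xs : List String) : Option String :=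
  match xs.find? (fun a => PySem.Str.startswith (PySem.Str.lower a) "smtp:") with
  | some q => if q = "" then none else pvSplitTail q
  | none => none

def pick_primary_smtp_py (proxy_addrs : Option (List String)) : Option String :=
  match proxy_addrs with
  | none => none
  | some xs =>
    if xs.isEmpty then none
    else
      match xs.find? (fun a => PySem.Str.startswith a "SMTP:") with
      | some p => if p = "" then pvAnySmtp xs else pvSplitTail p
      | none => pvAnySmtp xs

-- ===== PORT B =====
-- B's single loop: return at the first exact "SMTP:" match, else keep the first case-insensitive candidate
def pvPickLoop : List String → Option String → Option String
  | [], any_smtp =>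
    match any_smtp with
    | some a => pvSplitTail a
    | none => none
  | a :: rest, any_smtp =>
    if PySem.Str.startswith a "SMTP:" then pvSplitTail a
    else pvPickLoop rest
      (if any_smtp = none ∧ PySem.Str.startswith (PySem.Str.lower a) "smtp:" = true then some a else any_smtp)

def pick_primary_smtp_py_alt (proxy_addrs : Option (List String)) : Option String :=
  match proxy_addrs with
  | none => none
  | some xs =>
    if xs.isEmpty then none
    else pvPickLoop xs none

-- ===== PRECONDITION & SPEC =====
def Spec_pick_primary_smtp_py (proxy_addrs : Option (List String)) (out : Option String) : Prop := out = pick_primary_smtp_py_alt proxy_addrs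
instance (proxy_addrs : Option (List String)) (out : Option String) : Decidable (Spec_pick_primary_smtp_py proxy_addrs out) := by unfold Spec_pick_primary_smtp_py; infer_instance

-- ===== CLAIM (what is proved, stated in full; the proofs are below) =====
def Claim_equal_pick_primary_smtp_py : Prop := ∀ (proxy_addrs : Option (List String)), Dom_pick_primary_smtp_py proxy_addrs → Spec_pick_primary_smtp_py proxy_addrs (pick_primary_smtp_py proxy_addrs)

-- ===== LEMMAS AND PROOFS =====

-- any string with the exact prefix "SMTP:" is nonempty
theorem pv_exact_ne_empty (p : String) (h : PySem.Str.startswith p "SMTP:" = true) : p ≠ "" := by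
  intro hp; subst hp; simp [PySem.Str.startswith] at h; revert h; decide

-- characterisation of B's loop in terms of A's two find? scans
theorem pvPickLoop_eq (xs : List String) (acc : Option String) :
    pvPickLoop xs acc =
      match xs.find? (fun a => PySem.Str.startswith a "SMTP:") with
      | some p => pvSplitTail p
      | none =>
        match (match acc with
               | some a => some a
               | none => xs.find? (fun a => PySem.Str.startswith (PySem.Str.lower a) "smtp:")) with
        | some q => pvSplitTail q
        | none => none := by
  induction xs generalizing acc with
  | nil => cases acc <;> simp [pvPickLoop]
  | cons a rest ih =>
    by_cases hx : PySem.Chars.startswith a.toList ['S','M','T','P',':'] = true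
    · simp [pvPickLoop, List.find?, hx]
    · by_cases hl : PySem.Chars.startswith (PySem.Chars.lower a.toList) ['s','m','t','p',':'] = true <;>
        cases acc <;> simp [pvPickLoop, List.find?, hx, hl, ih]

theorem pv_anySmtp_eq (xs : List String) :
    pvAnySmtp xs =
      match xs.find? (fun a => PySem.Str.startswith (PySem.Str.lower a) "smtp:") with
      | some q => pvSplitTail q
      | none => none := by
  unfold pvAnySmtp
  cases hq : xs.find? (fun a => PySem.Str.startswith (PySem.Str.lower a) "smtp:") with
  | none => rfl
  | some q =>
    have hpred := List.find?_some hq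
    have hq' : q ≠ "" := by
      intro h; subst h
      simp [PySem.Str.lower, PySem.Str.startswith] at hpred
      revert hpred; decide
    simp [hq']

-- ===== VERDICT (by name: the statement is the Claim_ definition above) =====
theorem pick_primary_smtp_py_spec : Claim_equal_pick_primary_smtp_py := by
  intro proxy_addrs _
  unfold Spec_pick_primary_smtp_py pick_primary_smtp_py pick_primary_smtp_py_alt
  cases proxy_addrs with
  | none => rfl
  | some xs =>
    cases xs with
    | nil => rfl
    | cons a rest =>
      simp only [List.isEmpty_cons, Bool.false_eq_true, if_false]
      rw [pvPickLoop_eq, pv_anySmtp_eq]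
      cases hp : (a :: rest).find? (fun a => PySem.Str.startswith a "SMTP:") with
      | none => rfl
      | some p =>
        have hpred := List.find?_some hp
        have hne : p ≠ "" := pv_exact_ne_empty p hpred
        simp [hne]
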